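-- pv_equiv track=rewrite | github.com/MultiOMR/BigDataProject | MultipleOMR/Process/Voting.py | __getBetterIndexSymbol
-- ===== SOURCE A (Python) =====
-- def __getBetterIndexSymbol(a0,a1,a2):
--     '''
--     returns the best symbol based on the first three parameters
--     [[D5_0.25,0.33,'start'....]
--     note,realDuration, tie
--     '''
--     symbol_count=[]
--     for i0 in a0:
--         s=0
--         if i0 in a1:
--             s=s+10
--         if i0 in a2:
--             s=s+1
--         symbol_count.append(s)
--     better=symbol_count.index(max(symbol_count))
--     index=a0[better]
--     return index
-- ===== SOURCE B (Python) =====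
-- def __getBetterIndexSymbol(a0, a1, a2):
--     '''
--     returns the best symbol based on the first three parameters
--     [[D5_0.25,0.33,'start'....]
--     note,realDuration, tie
--     '''
--     # scores are only 11 / 10 / 1 / 0, so the first max is the first element
--     # of the highest non-empty priority class: both lists, a1 only, a2 only, neither
--     in1, in2 = set(a1), set(a2)
--     for x in a0:
--         if x in in1 and x in in2:
--             return x
--     for x in a0:
--         if x in in1:
--             return x
--     for x in a0:
--         if x in in2:
--             return x
--     return a0[0]
-- ===== Notes on version B (the rewrite author's own statement) =====
-- stated objective: faster
-- what changed: Replaces the scores-list + index(max(...)) argmax with a score-free priority cascade: because the only possible scores are 11/10/1/0, B builds hash sets of a1 and a2 once and does staged scans returning the first element in both a1 and a2, else the first in a1, else the first in a2, else a0[0]; Pre_ excludes empty a0, on which A raises ValueError and B raises IndexError.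
import Mathlib
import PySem

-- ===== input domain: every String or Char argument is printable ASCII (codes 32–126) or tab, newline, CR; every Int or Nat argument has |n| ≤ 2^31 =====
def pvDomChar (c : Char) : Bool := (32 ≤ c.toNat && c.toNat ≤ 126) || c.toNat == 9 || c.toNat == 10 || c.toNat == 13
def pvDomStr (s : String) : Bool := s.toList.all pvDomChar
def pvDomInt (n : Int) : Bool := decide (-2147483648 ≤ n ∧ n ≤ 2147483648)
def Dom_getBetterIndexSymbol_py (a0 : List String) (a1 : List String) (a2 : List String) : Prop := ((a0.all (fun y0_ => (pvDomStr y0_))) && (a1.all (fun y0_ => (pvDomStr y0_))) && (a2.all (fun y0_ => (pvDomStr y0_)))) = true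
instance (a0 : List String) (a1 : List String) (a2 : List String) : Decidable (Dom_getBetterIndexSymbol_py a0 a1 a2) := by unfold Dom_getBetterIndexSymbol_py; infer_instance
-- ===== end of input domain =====

-- B replaces A's scores-list + .index(max(...)) argmax by a score-free priority cascade
-- (first element in both a1 and a2, else first in a1, else first in a2, else a0[0]);
-- equivalence of the return values is proved for nonempty a0.

-- ===== PORT A =====
def getBetterIndexSymbol_py (a0 : List String) (a1 : List String) (a2 : List String) : String :=
  let symbol_count : List Int := a0.foldl (fun acc i0 =>
    let s : Int := 0
    let s := if i0 ∈ a1 then s + 10 else s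
    let s := if i0 ∈ a2 then s + 1 else s
    acc ++ [s]) []
  match PySem.List.max? symbol_count (fun y => y) with
  | none => ""            -- max([]) raises ValueError; excluded by Pre_
  | some m =>
    match PySem.List.index? symbol_count m with
    | none => ""          -- unreachable: the max is in the list
    | some better =>
      match PySem.List.pyGet? a0 (better : Int) with
      | none => ""        -- unreachable: better < len(a0)
      | some index => index

-- ===== PORT B =====
def getBetterIndexSymbol_py_alt (a0 : List String) (a1 : List String) (a2 : List String) : String :=
  match a0.find? (fun x => a1.contains x && a2.contains x) with
  | some x => x
  | none =>
    match a0.find? (fun x => a1.contains x) with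
    | some x => x
    | none =>
      match a0.find? (fun x => a2.contains x) with
      | some x => x
      | none =>
        match a0 with
        | [] => ""        -- a0[0] raises IndexError; excluded by Pre_
        | h :: _ => h

-- ===== PRECONDITION & SPEC =====
-- Pre_ excludes only empty a0, on which Python A raises ValueError (max of an empty
-- sequence) and Python B raises IndexError (a0[0]).
def Pre_getBetterIndexSymbol_py (a0 : List String) (a1 : List String) (a2 : List String) : Prop := a0 ≠ []
instance (a0 : List String) (a1 : List String) (a2 : List String) : Decidable (Pre_getBetterIndexSymbol_py a0 a1 a2) := by unfold Pre_getBetterIndexSymbol_py; infer_instance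

def pvWitness_getBetterIndexSymbol_py : List String × List String × List String := (["a", "b"], ["b"], [])

def Spec_getBetterIndexSymbol_py (a0 : List String) (a1 : List String) (a2 : List String) (out : String) : Prop := out = getBetterIndexSymbol_py_alt a0 a1 a2
instance (a0 : List String) (a1 : List String) (a2 : List String) (out : String) : Decidable (Spec_getBetterIndexSymbol_py a0 a1 a2 out) := by unfold Spec_getBetterIndexSymbol_py; infer_instance

-- ===== CLAIM (what is proved, stated in full; the proofs are below) =====
def Claim_equal_getBetterIndexSymbol_py : Prop := ∀ (a0 : List String) (a1 : List String) (a2 : List String), Dom_getBetterIndexSymbol_py a0 a1 a2 → Pre_getBetterIndexSymbol_py a0 a1 a2 → Spec_getBetterIndexSymbol_py a0 a1 a2 (getBetterIndexSymbol_py a0 a1 a2)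

-- ===== LEMMAS AND PROOFS =====

-- the per-element score A computes
def pvScore (a1 a2 : List String) (x : String) : Int :=
  (if x ∈ a1 then (10 : Int) else 0) + (if x ∈ a2 then (1 : Int) else 0)

-- one step of the running first-argmax
def pvStep {α : Type} (key : α → Int) (m x : α) : α := if key m < key x then x else m

theorem pvMax?_go {α : Type} (key : α → Int) :
    ∀ (t : List α) (m : α),
      List.foldl (fun acc x => match acc with
        | none => some x
        | some m => if key m < key x then some x else some m) (some m) t
        = some (t.foldl (pvStep key) m) := by
  intro t
  induction t with
  | nil => intro m; simp [List.foldl]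
  | cons x t ih =>
      intro m
      simp only [List.foldl]
      by_cases h : key m < key x
      · rw [if_pos h, ih]; simp [pvStep, h]
      · rw [if_neg h, ih]; simp [pvStep, h]

theorem pvMax?_cons {α : Type} (key : α → Int) (h : α) (t : List α) :
    PySem.List.max? (h :: t) key = some (t.foldl (pvStep key) h) := by
  unfold PySem.List.max?
  simp only [List.foldl]
  exact pvMax?_go key t h

-- the running argmax is the FIRST element attaining the maximum score
theorem pvFold_spec {α : Type} (key : α → Int) :
    ∀ (t : List α) (b : α),
      ∃ pre suf, b :: t = pre ++ (t.foldl (pvStep key) b) :: suf ∧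
        (∀ y ∈ pre, key y < key (t.foldl (pvStep key) b)) ∧
        (∀ y ∈ b :: t, key y ≤ key (t.foldl (pvStep key) b)) := by
  intro t
  induction t with
  | nil =>
      intro b
      exact ⟨[], [], by simp, by simp, by simp [List.foldl]⟩
  | cons x t ih =>
      intro b
      have hfold : (x :: t).foldl (pvStep key) b = t.foldl (pvStep key) (pvStep key b x) := by
        simp [List.foldl]
      by_cases hbx : key b < key x
      · have hb' : pvStep key b x = x := by simp [pvStep, hbx]
        obtain ⟨pre, suf, hdec, hlt, hle⟩ := ih x
        refine ⟨b :: pre, suf, ?_, ?_, ?_⟩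
        · rw [hfold, hb']; simpa using congrArg (fun l => b :: l) hdec
        · intro y hy
          rw [hfold, hb']
          rcases List.mem_cons.mp hy with rfl | hy
          · exact lt_of_lt_of_le hbx (hle x (by simp))
          · exact hlt y hy
        · intro y hy
          rw [hfold, hb']
          rcases List.mem_cons.mp hy with rfl | hy
          · exact le_of_lt (lt_of_lt_of_le hbx (hle x (by simp)))
          · exact hle y hy
      · have hb' : pvStep key b x = b := by simp [pvStep, hbx]
        obtain ⟨pre, suf, hdec, hlt, hle⟩ := ih b
        have hxle : key x ≤ key b := le_of_not_gt hbx
        cases pre with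
        | nil =>
            have hr : t.foldl (pvStep key) b = b := by
              have := congrArg (fun l => l.head?) hdec
              simp at this
              exact this.symm
            refine ⟨[], x :: suf, ?_, by simp, ?_⟩
            · have hsuf : t = suf := by simpa [hr] using hdec
              rw [hfold, hb', hr]
              simp [hsuf]
            · intro y hy
              rw [hfold, hb']
              rcases List.mem_cons.mp hy with rfl | hy
              · simp [hr]
              · rcases List.mem_cons.mp hy with rfl | hy
                · simpa [hr] using hxle
                · exact hle y (by simp [hy])
        | cons p0 pre' =>
            have hp0 : p0 = b ∧ t = pre' ++ t.foldl (pvStep key) b :: suf := by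
              have h' := hdec
              simp only [List.cons_append, List.cons.injEq] at h'
              exact ⟨h'.1.symm, h'.2⟩
            refine ⟨b :: x :: pre', suf, ?_, ?_, ?_⟩
            · rw [hfold, hb']
              conv_lhs => rw [hp0.2]
              simp
            · intro y hy
              rw [hfold, hb']
              have hb_lt : key b < key (t.foldl (pvStep key) b) := by
                have := hlt p0 (by simp)
                simpa [hp0.1] using this
              rcases List.mem_cons.mp hy with rfl | hy
              · exact hb_lt
              · rcases List.mem_cons.mp hy with rfl | hy
                · exact lt_of_le_of_lt hxle hb_lt
                · exact hlt y (by simp [hy])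
            · intro y hy
              rw [hfold, hb']
              rcases List.mem_cons.mp hy with rfl | hy
              · exact hle y (by simp)
              · rcases List.mem_cons.mp hy with rfl | hy
                · exact le_trans hxle (hle b (by simp))
                · exact hle y (by simp [hy])

theorem pvScore_eq (a1 a2 : List String) (x : String) :
    (if x ∈ a2 then (if x ∈ a1 then (0 : Int) + 10 else 0) + 1
     else (if x ∈ a1 then (0 : Int) + 10 else 0)) = pvScore a1 a2 x := by
  unfold pvScore
  split_ifs <;> ring

theorem pvCounts_eq_map (a0 a1 a2 : List String) :
    a0.foldl (fun acc i0 =>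
      let s : Int := 0
      let s := if i0 ∈ a1 then s + 10 else s
      let s := if i0 ∈ a2 then s + 1 else s
      acc ++ [s]) [] = a0.map (pvScore a1 a2) := by
  have : ∀ (l : List String) (acc : List Int),
      l.foldl (fun acc i0 =>
        let s : Int := 0
        let s := if i0 ∈ a1 then s + 10 else s
        let s := if i0 ∈ a2 then s + 1 else s
        acc ++ [s]) acc = acc ++ l.map (pvScore a1 a2) := by
    intro l
    induction l with
    | nil => intro acc; simp
    | cons x l ih =>
        intro acc
        simp only [List.foldl, List.map]
        rw [ih, ← pvScore_eq a1 a2 x]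
        simp
  simpa using this a0 []

-- find? on a decomposed list whose prefix all fails the predicate and pivot passes
theorem pvFind?_first {α : Type} (p : α → Bool) (pre suf : List α) (r : α)
    (hpre : ∀ y ∈ pre, p y = false) (hr : p r = true) :
    (pre ++ r :: suf).find? p = some r := by
  induction pre with
  | nil => simp [List.find?, hr]
  | cons q pre ih =>
      have hq : p q = false := hpre q (by simp)
      simp only [List.cons_append, List.find?, hq]
      exact ih (fun y hy => hpre y (by simp [hy]))

-- score bounds and characterizations
theorem pvScore_nonneg (a1 a2 : List String) (x : String) : 0 ≤ pvScore a1 a2 x := by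
  unfold pvScore; split_ifs <;> omega

theorem pvScore_a1 (a1 a2 : List String) (x : String) (h : x ∈ a1) :
    10 ≤ pvScore a1 a2 x := by
  unfold pvScore; rw [if_pos h]; split_ifs <;> omega

theorem pvScore_a2 (a1 a2 : List String) (x : String) (h : x ∈ a2) :
    1 ≤ pvScore a1 a2 x := by
  unfold pvScore; rw [if_pos h]; split_ifs <;> omega

theorem pvScore_both (a1 a2 : List String) (x : String) (h1 : x ∈ a1) (h2 : x ∈ a2) :
    pvScore a1 a2 x = 11 := by
  unfold pvScore; rw [if_pos h1, if_pos h2]; norm_num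

-- B's cascade returns the first argmax of pvScore
theorem pvCascade_eq (a1 a2 : List String) (pre suf : List String) (r : String)
    (hlt : ∀ y ∈ pre, pvScore a1 a2 y < pvScore a1 a2 r)
    (hle : ∀ y ∈ pre ++ r :: suf, pvScore a1 a2 y ≤ pvScore a1 a2 r) :
    getBetterIndexSymbol_py_alt (pre ++ r :: suf) a1 a2 = r := by
  unfold getBetterIndexSymbol_py_alt
  by_cases h1 : r ∈ a1
  · by_cases h2 : r ∈ a2
    · -- score 11: first cascade stage hits r
      have hfind : (pre ++ r :: suf).find? (fun x => a1.contains x && a2.contains x) = some r := by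
        apply pvFind?_first
        · intro y hy
          have hy11 := hlt y hy
          rw [pvScore_both a1 a2 r h1 h2] at hy11
          by_contra hcon
          simp only [Bool.not_eq_false, Bool.and_eq_true, List.contains_eq_mem,
            decide_eq_true_eq] at hcon
          rw [pvScore_both a1 a2 y hcon.1 hcon.2] at hy11
          omega
        · simp [List.contains_eq_mem, h1, h2]
      rw [hfind]
    · -- score 10: stage 1 fails everywhere, stage 2 hits r
      have hsr : pvScore a1 a2 r = 10 := by
        unfold pvScore; rw [if_pos h1, if_neg h2]; norm_num
      have hfind1 : (pre ++ r :: suf).find? (fun x => a1.contains x && a2.contains x) = none := by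
        rw [List.find?_eq_none]
        intro y hy
        have hley := hle y hy
        rw [hsr] at hley
        simp only [Bool.and_eq_true, List.contains_eq_mem, decide_eq_true_eq, not_and]
        intro hy1 hy2
        rw [pvScore_both a1 a2 y hy1 hy2] at hley; omega
      have hfind2 : (pre ++ r :: suf).find? (fun x => a1.contains x) = some r := by
        apply pvFind?_first
        · intro y hy
          have hy10 := hlt y hy
          rw [hsr] at hy10
          by_contra hcon
          simp only [Bool.not_eq_false, List.contains_eq_mem, decide_eq_true_eq] at hcon
          have := pvScore_a1 a1 a2 y hcon
          omega
        · simp [List.contains_eq_mem, h1]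
      rw [hfind1, hfind2]
  · by_cases h2 : r ∈ a2
    · -- score 1: stages 1,2 fail everywhere, stage 3 hits r
      have hsr : pvScore a1 a2 r = 1 := by
        unfold pvScore; rw [if_neg h1, if_pos h2]; norm_num
      have hno1 : ∀ y ∈ pre ++ r :: suf, y ∉ a1 := by
        intro y hy hcon
        have hley := hle y hy
        rw [hsr] at hley
        have := pvScore_a1 a1 a2 y hcon
        omega
      have hfind1 : (pre ++ r :: suf).find? (fun x => a1.contains x && a2.contains x) = none := by
        rw [List.find?_eq_none]
        intro y hy
        simp only [Bool.and_eq_true, List.contains_eq_mem, decide_eq_true_eq, not_and]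
        exact fun hy1 _ => hno1 y hy hy1
      have hfind2 : (pre ++ r :: suf).find? (fun x => a1.contains x) = none := by
        rw [List.find?_eq_none]
        intro y hy
        simp only [List.contains_eq_mem, decide_eq_true_eq]
        exact hno1 y hy
      have hfind3 : (pre ++ r :: suf).find? (fun x => a2.contains x) = some r := by
        apply pvFind?_first
        · intro y hy
          have hy1 := hlt y hy
          rw [hsr] at hy1
          by_contra hcon
          simp only [Bool.not_eq_false, List.contains_eq_mem, decide_eq_true_eq] at hcon
          have := pvScore_a2 a1 a2 y hcon
          omega
        · simp [List.contains_eq_mem, h2]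
      rw [hfind1, hfind2, hfind3]
    · -- score 0: every stage fails; pre is empty, so r is the head
      have hsr : pvScore a1 a2 r = 0 := by
        unfold pvScore; rw [if_neg h1, if_neg h2]; norm_num
      have hpre : pre = [] := by
        cases pre with
        | nil => rfl
        | cons q pre' =>
            have hq := hlt q (by simp)
            have hq0 := pvScore_nonneg a1 a2 q
            rw [hsr] at hq
            omega
      subst hpre
      have hno : ∀ y ∈ r :: suf, y ∉ a1 ∧ y ∉ a2 := by
        intro y hy
        have hley := hle y (by simpa using hy)
        rw [hsr] at hley
        constructor
        · intro hcon
          have := pvScore_a1 a1 a2 y hcon; omega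
        · intro hcon
          have := pvScore_a2 a1 a2 y hcon; omega
      have hfind1 : (r :: suf).find? (fun x => a1.contains x && a2.contains x) = none := by
        rw [List.find?_eq_none]
        intro y hy
        simp only [Bool.and_eq_true, List.contains_eq_mem, decide_eq_true_eq, not_and]
        exact fun hy1 _ => (hno y hy).1 hy1
      have hfind2 : (r :: suf).find? (fun x => a1.contains x) = none := by
        rw [List.find?_eq_none]
        intro y hy
        simp only [List.contains_eq_mem, decide_eq_true_eq]
        exact (hno y hy).1
      have hfind3 : (r :: suf).find? (fun x => a2.contains x) = none := by
        rw [List.find?_eq_none]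
        intro y hy
        simp only [List.contains_eq_mem, decide_eq_true_eq]
        exact (hno y hy).2
      simp only [List.nil_append]
      rw [hfind1, hfind2, hfind3]

-- ===== VERDICT (by name: the statement is the Claim_ definition above) =====

theorem getBetterIndexSymbol_py_spec : Claim_equal_getBetterIndexSymbol_py := by
  intro a0 a1 a2 _hdom hpre
  unfold Spec_getBetterIndexSymbol_py
  cases a0 with
  | nil => exact absurd rfl hpre
  | cons h t =>
      set sc := pvScore a1 a2 with hsc
      set r := t.foldl (pvStep sc) h with hr
      obtain ⟨pre, suf, hdec, hlt, hle⟩ := pvFold_spec sc t h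
      -- B's value is r
      have hB : getBetterIndexSymbol_py_alt (h :: t) a1 a2 = r := by
        rw [hdec]
        exact pvCascade_eq a1 a2 pre suf r (by rw [hr]; exact hlt)
          (by rw [hr]; intro y hy; exact hle y (hdec ▸ hy))
      -- A's scores list
      have hcounts : (h :: t).foldl (fun acc i0 =>
          let s : Int := 0
          let s := if i0 ∈ a1 then s + 10 else s
          let s := if i0 ∈ a2 then s + 1 else s
          acc ++ [s]) [] = (h :: t).map sc := pvCounts_eq_map (h :: t) a1 a2
      have hmapdec : (h :: t).map sc = pre.map sc ++ sc r :: suf.map sc := by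
        rw [hdec, ← hr]; simp
      obtain ⟨M, hM⟩ : ∃ M, PySem.List.max? ((h :: t).map sc) (fun y => y) = some M :=
        ⟨_, by simpa using pvMax?_cons (fun y : Int => y) (sc h) (t.map sc)⟩
      have hMmem : M ∈ (h :: t).map sc := PySem.List.max?_mem hM
      have hMmax : ∀ y ∈ (h :: t).map sc, y ≤ M := by
        intro y hy; exact PySem.List.max?_isMax hM y hy
      have hMval : M = sc r := by
        obtain ⟨z, hz, hzM⟩ := List.mem_map.mp hMmem
        have h1 : M ≤ sc r := hzM ▸ hle z hz
        have h2 : sc r ≤ M := hMmax (sc r) (by rw [hmapdec]; simp)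
        exact le_antisymm h1 h2
      have hidx : PySem.List.index? ((h :: t).map sc) (sc r) = some (pre.map sc).length := by
        rw [PySem.List.index?_eq_some_iff]
        refine ⟨pre.map sc, suf.map sc, hmapdec, rfl, ?_⟩
        intro hmem
        obtain ⟨z, hz, hzr⟩ := List.mem_map.mp hmem
        exact absurd hzr (ne_of_lt (hlt z hz))
      have hget : PySem.List.pyGet? (h :: t) ((pre.length : Nat) : Int) = some r := by
        rw [hdec]
        exact PySem.List.pyGet?_append_length pre suf r
      unfold getBetterIndexSymbol_py
      simp only [hcounts, hM, hMval, hidx, List.length_map, hget, hB]
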